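-- pv_equiv track=rewrite | github.com/G00387859/Fundamentals-of-Data-Analysis | Count.py | count
-- ===== SOURCE A (Python) =====
-- def count(list1):
-- # Converting list to upper case
--     l = [x.upper() for x in list1]
-- # create a empty dict [2]
--     items = {}
-- #loop over the list
--     for i in l:
-- #check if i is "in" items if true increment [1]
--         if i in items:
--             items[i] +=1
--         else:
--             items[i] = 1
--     return items
-- ===== SOURCE B (Python) =====
-- def count(list1):
--     l = [x.upper() for x in list1]
--     return {v: l.count(v) for v in dict.fromkeys(l)}
-- ===== Notes on version B (the rewrite author's own statement) =====
-- stated objective: simpler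
-- what changed: Replaces the incremental if-in-dict counting loop with a one-line pass: dedupe the uppercased list in first-occurrence order with dict.fromkeys, then map each distinct key to l.count(key).
import Mathlib
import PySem

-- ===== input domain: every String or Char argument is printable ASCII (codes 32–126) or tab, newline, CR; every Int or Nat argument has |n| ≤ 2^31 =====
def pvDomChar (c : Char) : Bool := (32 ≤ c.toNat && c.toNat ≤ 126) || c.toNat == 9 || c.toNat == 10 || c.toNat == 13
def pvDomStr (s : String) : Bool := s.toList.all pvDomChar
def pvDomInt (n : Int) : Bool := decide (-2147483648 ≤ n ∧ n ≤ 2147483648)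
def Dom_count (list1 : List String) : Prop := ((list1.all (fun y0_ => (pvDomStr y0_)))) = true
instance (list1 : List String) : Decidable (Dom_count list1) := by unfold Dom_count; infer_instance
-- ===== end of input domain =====

-- B replaces A's incremental dict-counting loop with dedupe-then-count-per-key (simpler one-liner, same result).


-- ===== PORT A =====
-- A: upper-case each element, then a left fold over the list maintaining a dict,
-- incrementing on 'i in items' and inserting 1 otherwise; the dict's items are returned.
def count (list1 : List String) : List (String × Int) :=
  let l := list1.map PySem.Str.upper
  (l.foldl (fun items i =>
      if items.contains i then items.insert i (items.getD i 0 + 1)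
      else items.insert i 1)
    (PySem.Dict.empty : PySem.Dict String Int)).items

-- ===== PORT B =====
-- B: dedupe the uppercased list in first-occurrence order (dict.fromkeys), then
-- map each distinct key to its l.count.
def count_alt (list1 : List String) : List (String × Int) :=
  let l := list1.map PySem.Str.upper
  (PySem.List.dedup l).map (fun v => (v, (PySem.List.count l v : Int)))

-- ===== PRECONDITION & SPEC =====
def Spec_count (list1 : List String) (out : List (String × Int)) : Prop := out = count_alt list1
instance (list1 : List String) (out : List (String × Int)) : Decidable (Spec_count list1 out) := by unfold Spec_count; infer_instance

-- ===== CLAIM (what is proved, stated in full; the proofs are below) =====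
def Claim_equal_count : Prop := ∀ (list1 : List String), Dom_count list1 → Spec_count list1 (count list1)

-- ===== LEMMAS AND PROOFS =====

-- ===== VERDICT (by name: the statement is the Claim_ definition above) =====
-- A's loop step is exactly 'insert i (getD i 0 + 1)': when i is absent, getD gives 0.
lemma count_step_eq (d : PySem.Dict String Int) (i : String) :
    (if d.contains i then d.insert i (d.getD i 0 + 1) else d.insert i 1)
      = d.insert i (d.getD i 0 + 1) := by
  by_cases h : d.contains i = true
  · simp [h]
  · simp only [Bool.not_eq_true] at h
    rw [h, if_neg (by simp), PySem.Dict.getD_of_not_contains (h := h)]; norm_num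

theorem count_spec : Claim_equal_count := by
  intro list1 _
  unfold Spec_count count count_alt
  simp only [funext fun d => funext fun i => count_step_eq d i,
    PySem.Dict.foldl_insert_getD_add_one_eq_counter, PySem.Dict.items_counter,
    PySem.List.dedup_eq_ofList, PySem.List.count_eq]
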